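-- pv_equiv track=rewrite | github.com/Shraefkt/dump | main/cover_calc.py | calc_min_cover
-- ===== SOURCE A (Python) =====
-- def calc_min_cover(a, b) -> list:
--     # base cases
--     if a == b:
--         return [a]
--     if b - a == 1 and a % 2 == 1:
--         return [a, b]
--
--     # recursive case
--     min_cover = []
--     if a % 2 == 1:
--         min_cover.append(a)
--     min_cover += calc_min_cover((a+1) // 2, (b-1) // 2) # recursive call for solving smaller problem
--     if b % 2 == 0:
--         min_cover.append(b)
--     return min_cover
-- ===== SOURCE B (Python) =====
-- def calc_min_cover(a, b) -> list:
--     # Closed-form boundaries per level k: the cover at level k spans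
--     # lo(k) = ceil(a / 2**k)  ..  hi(k) = (b + 1) // 2**k - 1.
--     def lo(k):
--         return -((-a) // 2 ** k)
--
--     def hi(k):
--         return (b + 1) // 2 ** k - 1
--
--     k = 0
--     while not (lo(k) == hi(k) or (hi(k) - lo(k) == 1 and lo(k) % 2 == 1)):
--         k += 1
--     left = [lo(j) for j in range(k) if lo(j) % 2 == 1]
--     right = [hi(j) for j in range(k) if hi(j) % 2 == 0]
--     mid = [lo(k)] if lo(k) == hi(k) else [lo(k), hi(k)]
--     return left + mid + right[::-1]
-- ===== Notes on version B (the rewrite author's own statement) =====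
-- stated objective: alternative
-- what changed: Replaced the recursion by closed-form per-level boundary formulas lo(k)=ceil(a/2^k), hi(k)=(b+1)//2^k-1: a loop finds the stopping level K and the result is assembled from three comprehensions (left odd boundaries, middle, reversed right even boundaries).
import Mathlib
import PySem

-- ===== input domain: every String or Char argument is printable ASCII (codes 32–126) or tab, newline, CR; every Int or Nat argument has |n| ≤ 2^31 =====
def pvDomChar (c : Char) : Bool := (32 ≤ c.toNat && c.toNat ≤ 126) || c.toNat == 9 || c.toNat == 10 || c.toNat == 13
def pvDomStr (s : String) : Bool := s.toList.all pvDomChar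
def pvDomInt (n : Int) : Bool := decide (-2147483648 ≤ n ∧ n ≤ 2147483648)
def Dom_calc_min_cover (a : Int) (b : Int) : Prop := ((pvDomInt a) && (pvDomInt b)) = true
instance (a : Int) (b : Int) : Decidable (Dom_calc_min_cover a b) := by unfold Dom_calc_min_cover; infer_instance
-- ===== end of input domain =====

-- B replaces A's recursion by closed-form per-level boundary formulas lo(k), hi(k): it searches the
-- stopping level K and assembles the answer from three comprehensions (alternative decomposition).
-- Both Pythons fail to terminate when a > b (A: RecursionError, B: infinite loop); Pre_ requires a ≤ b.

-- ===== PORT A =====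
-- fuel makes the recursion total in Lean; (b-a).toNat + 1 fuel suffices on Pre_ (proved below)
def pvCalcA : Nat → Int → Int → List Int
  | 0, _, _ => []
  | fuel + 1, a, b =>
    if a = b then [a]
    else if b - a = 1 ∧ PySem.Int.mod a 2 = 1 then [a, b]
    else
      (if PySem.Int.mod a 2 = 1 then [a] else []) ++
      pvCalcA fuel (PySem.Int.floordiv (a + 1) 2) (PySem.Int.floordiv (b - 1) 2) ++
      (if PySem.Int.mod b 2 = 0 then [b] else [])

def calc_min_cover (a : Int) (b : Int) : List Int := pvCalcA ((b - a).toNat + 1) a b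

-- ===== PORT B =====
-- Source B's closed-form level boundaries: lo(k) = -((-a) // 2**k), hi(k) = (b+1) // 2**k - 1
def pvLo (a : Int) (k : Nat) : Int := -(PySem.Int.floordiv (-a) ((2 : Int) ^ k))
def pvHi (b : Int) (k : Nat) : Int := PySem.Int.floordiv (b + 1) ((2 : Int) ^ k) - 1

-- Source B's while-loop stopping condition at level k
def pvStopB (a : Int) (b : Int) (k : Nat) : Bool :=
  (pvLo a k == pvHi b k) ||
    ((pvHi b k - pvLo a k == 1) && (PySem.Int.mod (pvLo a k) 2 == 1))

-- the 'k = 0; while not stop(k): k += 1' search, with fuel ((b-a).toNat + 1 suffices on Pre_)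
def pvFindK : Nat → Int → Int → Nat → Nat
  | 0, _, _, k => k
  | fuel + 1, a, b, k => if pvStopB a b k then k else pvFindK fuel a b (k + 1)

-- the three comprehensions of Source B: left + mid + right[::-1] for a given stopping level K
def pvCover (a : Int) (b : Int) (K : Nat) : List Int :=
  ((List.range K).filter (fun j => PySem.Int.mod (pvLo a j) 2 == 1)).map (pvLo a) ++
  (if pvLo a K == pvHi b K then [pvLo a K] else [pvLo a K, pvHi b K]) ++
  (((List.range K).filter (fun j => PySem.Int.mod (pvHi b j) 2 == 0)).map (pvHi b)).reverse

def calc_min_cover_alt (a : Int) (b : Int) : List Int :=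
  pvCover a b (pvFindK ((b - a).toNat + 1) a b 0)

-- ===== PRECONDITION & SPEC =====
-- Pre_ excludes a > b, on which Python A overflows the recursion stack (and B loops forever).
def Pre_calc_min_cover (a : Int) (b : Int) : Prop := a ≤ b
instance (a : Int) (b : Int) : Decidable (Pre_calc_min_cover a b) := by unfold Pre_calc_min_cover; infer_instance
def pvWitness_calc_min_cover : Int × Int := (3, 11)

def Spec_calc_min_cover (a : Int) (b : Int) (out : List Int) : Prop := out = calc_min_cover_alt a b
instance (a : Int) (b : Int) (out : List Int) : Decidable (Spec_calc_min_cover a b out) := by unfold Spec_calc_min_cover; infer_instance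

-- ===== CLAIM (what is proved, stated in full; the proofs are below) =====
def Claim_equal_calc_min_cover : Prop := ∀ (a : Int) (b : Int), Dom_calc_min_cover a b → Pre_calc_min_cover a b → Spec_calc_min_cover a b (calc_min_cover a b)

-- ===== LEMMAS AND PROOFS =====

lemma pvCalcA_succ (f : Nat) (a b : Int) :
    pvCalcA (f + 1) a b =
      if a = b then [a]
      else if b - a = 1 ∧ PySem.Int.mod a 2 = 1 then [a, b]
      else
        (if PySem.Int.mod a 2 = 1 then [a] else []) ++
        pvCalcA f (PySem.Int.floordiv (a + 1) 2) (PySem.Int.floordiv (b - 1) 2) ++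
        (if PySem.Int.mod b 2 = 0 then [b] else []) := rfl

lemma pvFindK_succ (f : Nat) (a b : Int) (k : Nat) :
    pvFindK (f + 1) a b k = if pvStopB a b k then k else pvFindK f a b (k + 1) := rfl

lemma pvLo_zero (a : Int) : pvLo a 0 = a := by
  simp [pvLo, PySem.Int.floordiv]

lemma pvHi_zero (b : Int) : pvHi b 0 = b := by
  simp [pvHi, PySem.Int.floordiv]

lemma pvLo_shift (a : Int) (k : Nat) :
    pvLo a (k + 1) = pvLo (PySem.Int.floordiv (a + 1) 2) k := by
  have h2 : (0:Int) < 2 := by norm_num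
  have hpk : (0:Int) < 2 ^ k := by positivity
  have hpk1 : (0:Int) < 2 ^ (k + 1) := by positivity
  unfold pvLo
  rw [PySem.Int.floordiv_eq_ediv_of_pos hpk1, PySem.Int.floordiv_eq_ediv_of_pos hpk,
      PySem.Int.floordiv_eq_ediv_of_pos h2]
  have hneg : -((a + 1) / 2) = (-a) / 2 := by omega
  rw [hneg, show ((2:Int) ^ (k + 1)) = 2 * 2 ^ k by ring,
      ← Int.ediv_ediv_of_nonneg (show (0:Int) ≤ 2 by norm_num)]

lemma pvHi_shift (b : Int) (k : Nat) :
    pvHi b (k + 1) = pvHi (PySem.Int.floordiv (b - 1) 2) k := by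
  have h2 : (0:Int) < 2 := by norm_num
  have hpk : (0:Int) < 2 ^ k := by positivity
  have hpk1 : (0:Int) < 2 ^ (k + 1) := by positivity
  unfold pvHi
  rw [PySem.Int.floordiv_eq_ediv_of_pos hpk1, PySem.Int.floordiv_eq_ediv_of_pos hpk,
      PySem.Int.floordiv_eq_ediv_of_pos h2]
  have hadd : (b - 1) / 2 + 1 = (b + 1) / 2 := by omega
  rw [hadd, show ((2:Int) ^ (k + 1)) = 2 * 2 ^ k by ring,
      ← Int.ediv_ediv_of_nonneg (show (0:Int) ≤ 2 by norm_num)]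

lemma pvStopB_shift (a b : Int) (k : Nat) :
    pvStopB a b (k + 1) = pvStopB (PySem.Int.floordiv (a + 1) 2) (PySem.Int.floordiv (b - 1) 2) k := by
  unfold pvStopB
  rw [pvLo_shift, pvHi_shift]

-- stop at level 0 is exactly A's base-case test
lemma pvStopB_zero (a b : Int) :
    pvStopB a b 0 = true ↔ (a = b ∨ (b - a = 1 ∧ PySem.Int.mod a 2 = 1)) := by
  unfold pvStopB
  rw [pvLo_zero, pvHi_zero]
  simp

lemma pvStep_le {a b : Int} (hab : a ≤ b) (hne : a ≠ b)
    (hbase : ¬ (b - a = 1 ∧ PySem.Int.mod a 2 = 1)) :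
    PySem.Int.floordiv (a + 1) 2 ≤ PySem.Int.floordiv (b - 1) 2 := by
  rw [PySem.Int.mod_eq_emod_of_pos (by omega : (0:Int) < 2)] at hbase
  rw [PySem.Int.floordiv_eq_ediv_of_pos (by omega), PySem.Int.floordiv_eq_ediv_of_pos (by omega)]
  by_cases h1 : b - a = 1
  · have : ¬ a % 2 = 1 := fun hh => hbase ⟨h1, hh⟩
    omega
  · omega

lemma pvStep_lt {a b : Int} (hab : a ≤ b) (hne : a ≠ b) :
    (PySem.Int.floordiv (b - 1) 2 - PySem.Int.floordiv (a + 1) 2).toNat < (b - a).toNat := by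
  rw [PySem.Int.floordiv_eq_ediv_of_pos (by omega), PySem.Int.floordiv_eq_ediv_of_pos (by omega)]
  omega

-- the search shifted one level down counts one extra step
lemma pvFindK_shift (f : Nat) : ∀ (a b : Int) (k : Nat),
    pvFindK f a b (k + 1) =
      pvFindK f (PySem.Int.floordiv (a + 1) 2) (PySem.Int.floordiv (b - 1) 2) k + 1 := by
  induction f with
  | zero => intro a b k; rfl
  | succ f ih =>
    intro a b k
    rw [pvFindK_succ, pvFindK_succ, pvStopB_shift]
    split_ifs with h
    · rfl
    · exact ih a b (k + 1)

-- with enough fuel the search result is fuel-independent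
lemma pvFindK_irrel : ∀ (n : Nat) (a b : Int), a ≤ b → (b - a).toNat ≤ n →
    ∀ f g, (b - a).toNat < f → (b - a).toNat < g → pvFindK f a b 0 = pvFindK g a b 0 := by
  intro n
  induction n with
  | zero =>
    intro a b hab hn f g hf hg
    obtain ⟨f', rfl⟩ : ∃ f', f = f' + 1 := ⟨f - 1, by omega⟩
    obtain ⟨g', rfl⟩ : ∃ g', g = g' + 1 := ⟨g - 1, by omega⟩
    have hstop : pvStopB a b 0 = true := by
      rw [pvStopB_zero]; left; omega
    rw [pvFindK_succ, pvFindK_succ, if_pos hstop, if_pos hstop]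
  | succ n ih =>
    intro a b hab hn f g hf hg
    obtain ⟨f', rfl⟩ : ∃ f', f = f' + 1 := ⟨f - 1, by omega⟩
    obtain ⟨g', rfl⟩ : ∃ g', g = g' + 1 := ⟨g - 1, by omega⟩
    rw [pvFindK_succ, pvFindK_succ]
    by_cases hstop : pvStopB a b 0 = true
    · rw [if_pos hstop, if_pos hstop]
    · rw [if_neg hstop, if_neg hstop,
          show (0:Nat) + 1 = 0 + 1 from rfl, pvFindK_shift f', pvFindK_shift g']
      have hne : a ≠ b := fun h => hstop ((pvStopB_zero a b).2 (Or.inl h))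
      have hbase : ¬ (b - a = 1 ∧ PySem.Int.mod a 2 = 1) :=
        fun h => hstop ((pvStopB_zero a b).2 (Or.inr h))
      have hle := pvStep_le hab hne hbase
      have hlt := pvStep_lt hab hne
      rw [ih _ _ hle (by omega) f' g' (by omega) (by omega)]

-- fuel-independence for A's recursion
lemma pvCalcA_irrel : ∀ (n : Nat) (a b : Int), a ≤ b → (b - a).toNat ≤ n →
    ∀ f g, (b - a).toNat < f → (b - a).toNat < g → pvCalcA f a b = pvCalcA g a b := by
  intro n
  induction n with
  | zero =>
    intro a b hab hn f g hf hg
    obtain ⟨f', rfl⟩ : ∃ f', f = f' + 1 := ⟨f - 1, by omega⟩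
    obtain ⟨g', rfl⟩ : ∃ g', g = g' + 1 := ⟨g - 1, by omega⟩
    have hEq : a = b := by omega
    rw [pvCalcA_succ, pvCalcA_succ, if_pos hEq, if_pos hEq]
  | succ n ih =>
    intro a b hab hn f g hf hg
    obtain ⟨f', rfl⟩ : ∃ f', f = f' + 1 := ⟨f - 1, by omega⟩
    obtain ⟨g', rfl⟩ : ∃ g', g = g' + 1 := ⟨g - 1, by omega⟩
    rw [pvCalcA_succ, pvCalcA_succ]
    by_cases h1 : a = b
    · rw [if_pos h1, if_pos h1]
    · rw [if_neg h1, if_neg h1]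
      by_cases h2 : b - a = 1 ∧ PySem.Int.mod a 2 = 1
      · rw [if_pos h2, if_pos h2]
      · rw [if_neg h2, if_neg h2]
        have hle := pvStep_le hab h1 h2
        have hlt := pvStep_lt hab h1
        rw [ih _ _ hle (by omega) f' g' (by omega) (by omega)]

-- peeling one level off the assembled cover
lemma pvCover_succ (a b : Int) (K : Nat) :
    pvCover a b (K + 1) =
      (if PySem.Int.mod a 2 = 1 then [a] else []) ++
      pvCover (PySem.Int.floordiv (a + 1) 2) (PySem.Int.floordiv (b - 1) 2) K ++
      (if PySem.Int.mod b 2 = 0 then [b] else []) := by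
  set a' := PySem.Int.floordiv (a + 1) 2 with ha'
  set b' := PySem.Int.floordiv (b - 1) 2 with hb'
  have hploc : (fun j => PySem.Int.mod (pvLo a j) 2 == 1) ∘ Nat.succ =
      (fun j => PySem.Int.mod (pvLo a' j) 2 == 1) := by
    funext j
    simp [Function.comp, Nat.succ_eq_add_one, pvLo_shift, ha']
  have hphic : (fun j => PySem.Int.mod (pvHi b j) 2 == 0) ∘ Nat.succ =
      (fun j => PySem.Int.mod (pvHi b' j) 2 == 0) := by
    funext j
    simp [Function.comp, Nat.succ_eq_add_one, pvHi_shift, hb']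
  have hmlo : pvLo a ∘ Nat.succ = pvLo a' := by
    funext j
    simp [Function.comp, Nat.succ_eq_add_one, pvLo_shift, ha']
  have hmhi : pvHi b ∘ Nat.succ = pvHi b' := by
    funext j
    simp [Function.comp, Nat.succ_eq_add_one, pvHi_shift, hb']
  unfold pvCover
  rw [List.range_succ_eq_map, List.filter_cons, List.filter_cons]
  simp only [pvLo_zero, pvHi_zero, List.filter_map, hploc, hphic,
    pvLo_shift a K, pvHi_shift b K, ← ha', ← hb']
  split_ifs with hcl hch hch <;>
    simp [pvLo_zero, pvHi_zero, List.reverse_cons] <;>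
    simp_all [PySem.Int.mod]

-- main equivalence, by strong induction on the interval width
lemma pvMain : ∀ (n : Nat) (a b : Int), a ≤ b → (b - a).toNat ≤ n →
    calc_min_cover a b = calc_min_cover_alt a b := by
  intro n
  induction n with
  | zero =>
    intro a b hab hn
    have hEq : a = b := by omega
    subst hEq
    have hstop : pvStopB a a 0 = true := by rw [pvStopB_zero]; left; rfl
    simp [calc_min_cover, calc_min_cover_alt, pvCalcA, pvFindK, hstop, pvCover,
      pvLo_zero, pvHi_zero]
  | succ n ih =>
    intro a b hab hn
    unfold calc_min_cover calc_min_cover_alt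
    obtain ⟨F, hF⟩ : ∃ F, (b - a).toNat + 1 = F + 1 := ⟨(b - a).toNat, rfl⟩
    rw [hF, pvCalcA_succ, pvFindK_succ]
    by_cases hbase : pvStopB a b 0 = true
    · -- base cases: the search stops at K = 0, left/right are empty
      rw [if_pos hbase]
      rcases (pvStopB_zero a b).1 hbase with h | h
      · rw [if_pos h]
        simp [pvCover, pvLo_zero, pvHi_zero, h]
      · have hne : a ≠ b := by omega
        rw [if_neg hne, if_pos h]
        simp [pvCover, pvLo_zero, pvHi_zero, hne]
    · -- recursive case
      have hne : a ≠ b := fun h => hbase ((pvStopB_zero a b).2 (Or.inl h))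
      have hb2 : ¬ (b - a = 1 ∧ PySem.Int.mod a 2 = 1) :=
        fun h => hbase ((pvStopB_zero a b).2 (Or.inr h))
      rw [if_neg hne, if_neg hb2, if_neg hbase]
      set a' := PySem.Int.floordiv (a + 1) 2 with ha'
      set b' := PySem.Int.floordiv (b - 1) 2 with hb'
      have hle : a' ≤ b' := pvStep_le hab hne hb2
      have hlt : (b' - a').toNat < (b - a).toNat := pvStep_lt hab hne
      rw [show (0:Nat) + 1 = 0 + 1 from rfl, pvFindK_shift F a b 0, ← ha', ← hb']
      rw [pvFindK_irrel ((b - a).toNat) a' b' hle (by omega) F ((b' - a').toNat + 1)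
          (by omega) (by omega)]
      rw [pvCalcA_irrel ((b - a).toNat) a' b' hle (by omega) F ((b' - a').toNat + 1)
          (by omega) (by omega)]
      rw [pvCover_succ, ← ha', ← hb']
      have hih := ih a' b' hle (by omega)
      unfold calc_min_cover calc_min_cover_alt at hih
      rw [hih]

-- ===== VERDICT (by name: the statement is the Claim_ definition above) =====
theorem calc_min_cover_spec : Claim_equal_calc_min_cover := by
  intro a b _ hpre
  unfold Spec_calc_min_cover
  exact pvMain ((b - a).toNat) a b hpre le_rfl
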